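-- pv_equiv track=rewrite | github.com/ucsdsysnet/Rosebud | fpga_src/accel/full_ids/rtl/fixed_sme/verilog_generator.py | content_conv
-- ===== SOURCE A (Python) =====
-- line_size = 8
--
-- def content_conv(content, nocase, offset):
--   byte_mode = 0
--   loc = offset
--   res = []
--   temp = ""
--   if content.startswith("!"):
--     print ("ERROR, ! not supported for content.")
--   for c in content[1:-1]:
--     if (c=='|'):
--       if (byte_mode==0):
--         byte_mode = 1
--       else:
--         res.append(("((s_axis_tdata[8*"+str(loc%line_size)+"+:8] == 8'h"+temp+") && s_axis_tkeep["+str(loc%line_size)+"])",loc))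
--         loc += 1
--         temp = ""
--         byte_mode = 0
--     else:
--       if (byte_mode==0):
--         if (nocase==True):
--           res.append(("(((s_axis_tdata[8*"+str(loc%line_size)+"+:8] == 8'd"+str(ord(c.lower()))+")||(s_axis_tdata[8*"+str(loc%line_size)+"+:8] == 8'd"+str(ord(c.upper()))+")) && s_axis_tkeep["+str(loc%line_size)+"])",loc))
--         else:
--           res.append(("((s_axis_tdata[8*"+str(loc%line_size)+"+:8] == 8'd"+str(ord(c))+") && s_axis_tkeep["+str(loc%line_size)+"])",loc))
--         loc += 1
--       else:
--         if (c==' '):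
--           res.append(("((s_axis_tdata[8*"+str(loc%line_size)+"+:8] == 8'h"+temp+") && s_axis_tkeep["+str(loc%line_size)+"])",loc))
--           loc += 1
--           temp = ""
--         else:
--           temp = temp + c
--
--   return res
-- ===== SOURCE B (Python) =====
-- line_size = 8
--
-- def content_conv(content, nocase, offset):
--   if content.startswith("!"):
--     print ("ERROR, ! not supported for content.")
--   parts = content[1:-1].split('|')
--   res = []
--   loc = offset
--   for i, part in enumerate(parts):
--     if i % 2 == 0:
--       # literal mode: one comparison per character
--       for c in part:
--         p = str(loc % line_size)
--         if nocase == True: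
--           res.append(("(((s_axis_tdata[8*"+p+"+:8] == 8'd"+str(ord(c.lower()))+")||(s_axis_tdata[8*"+p+"+:8] == 8'd"+str(ord(c.upper()))+")) && s_axis_tkeep["+p+"])", loc))
--         else:
--           res.append(("((s_axis_tdata[8*"+p+"+:8] == 8'd"+str(ord(c))+") && s_axis_tkeep["+p+"])", loc))
--         loc += 1
--     else:
--       # hex mode: space-separated tokens; a trailing unclosed segment keeps its
--       # last token pending forever, so it is never emitted
--       tokens = part.split(' ')
--       if i == len(parts) - 1:
--         tokens = tokens[:-1]
--       for t in tokens:
--         p = str(loc % line_size)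
--         res.append(("((s_axis_tdata[8*"+p+"+:8] == 8'h"+t+") && s_axis_tkeep["+p+"])", loc))
--         loc += 1
--   return res
-- ===== Notes on version B (the rewrite author's own statement) =====
-- stated objective: alternative
-- what changed: A's per-character state machine (byte_mode flag with a temp accumulator) is replaced by a split-based decomposition: split the inner string on '|', emit even parts character-wise and odd parts as space-split hex tokens, dropping the pending last token of a trailing unclosed hex segment.
import Mathlib
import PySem

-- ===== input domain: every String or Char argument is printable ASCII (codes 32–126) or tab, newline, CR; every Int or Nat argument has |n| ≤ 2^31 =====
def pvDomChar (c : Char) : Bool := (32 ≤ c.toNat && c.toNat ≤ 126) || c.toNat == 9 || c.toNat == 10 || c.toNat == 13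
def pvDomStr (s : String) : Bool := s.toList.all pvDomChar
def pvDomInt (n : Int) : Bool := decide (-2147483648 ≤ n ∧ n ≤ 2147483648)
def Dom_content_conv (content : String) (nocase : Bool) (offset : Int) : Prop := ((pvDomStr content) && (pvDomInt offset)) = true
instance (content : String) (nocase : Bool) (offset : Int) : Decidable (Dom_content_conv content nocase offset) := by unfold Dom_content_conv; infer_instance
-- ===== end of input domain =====

-- B replaces A's one-character state machine (byte_mode/temp flags) by a split-based
-- decomposition ('|' then ' '); same return value, 'alternative' objective.
-- Python's `print` on a leading "!" is an I/O side effect without influence on the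
-- return value; both ports model the return value only.

-- ===== PORT A =====
-- the two emitted comparison strings (identical concatenation expressions in both
-- Pythons, factored out once):
def pvHexCmp (loc : Int) (temp : List Char) : String × Int :=
  (String.mk ("((s_axis_tdata[8*".toList ++ PySem.Int.toChars (PySem.Int.mod loc 8)
    ++ "+:8] == 8'h".toList ++ temp ++ ") && s_axis_tkeep[".toList
    ++ PySem.Int.toChars (PySem.Int.mod loc 8) ++ "])".toList), loc)

def pvLitCmp (nocase : Bool) (loc : Int) (c : Char) : String × Int :=
  if nocase then
    (String.mk ("(((s_axis_tdata[8*".toList ++ PySem.Int.toChars (PySem.Int.mod loc 8)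
      ++ "+:8] == 8'd".toList ++ PySem.Int.toChars ((PySem.Chars.lowerChar c).toNat : Int)
      ++ ")||(s_axis_tdata[8*".toList ++ PySem.Int.toChars (PySem.Int.mod loc 8)
      ++ "+:8] == 8'd".toList ++ PySem.Int.toChars ((PySem.Chars.upperChar c).toNat : Int)
      ++ ")) && s_axis_tkeep[".toList ++ PySem.Int.toChars (PySem.Int.mod loc 8)
      ++ "])".toList), loc)
  else
    (String.mk ("((s_axis_tdata[8*".toList ++ PySem.Int.toChars (PySem.Int.mod loc 8)
      ++ "+:8] == 8'd".toList ++ PySem.Int.toChars (c.toNat : Int)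
      ++ ") && s_axis_tkeep[".toList ++ PySem.Int.toChars (PySem.Int.mod loc 8)
      ++ "])".toList), loc)

-- A's loop body: state = (byte_mode, loc, res, temp)
def pvStepA (nocase : Bool) :
    Int × Int × List (String × Int) × List Char → Char →
      Int × Int × List (String × Int) × List Char
  | (byteMode, loc, res, temp), c =>
    if c = '|' then
      if byteMode = 0 then (1, loc, res, temp)
      else (0, loc + 1, res ++ [pvHexCmp loc temp], [])
    else
      if byteMode = 0 then (byteMode, loc + 1, res ++ [pvLitCmp nocase loc c], temp)
      else if c = ' ' then (byteMode, loc + 1, res ++ [pvHexCmp loc temp], [])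
      else (byteMode, loc, res, temp ++ [c])

def content_conv (content : String) (nocase : Bool) (offset : Int) : List (String × Int) :=
  ((PySem.List.slice content.toList (some 1) (some (-1))).foldl (pvStepA nocase)
    (0, offset, [], [])).2.2.1

-- ===== PORT B =====
def pvEmitLit (nocase : Bool) : List Char → Int → List (String × Int)
  | [], _ => []
  | c :: cs, loc => pvLitCmp nocase loc c :: pvEmitLit nocase cs (loc + 1)

def pvEmitHex : List (List Char) → Int → List (String × Int)
  | [], _ => []
  | t :: ts, loc => pvHexCmp loc t :: pvEmitHex ts (loc + 1)

-- loop over enumerate(parts); `rest = []` is Source B's `i == len(parts) - 1`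
def pvGoB (nocase : Bool) : List (List Char) → Nat → Int → List (String × Int)
  | [], _, _ => []
  | part :: rest, i, loc =>
    if i % 2 = 0 then
      pvEmitLit nocase part loc ++ pvGoB nocase rest (i + 1) (loc + (part.length : Int))
    else
      let tokens := PySem.Chars.splitOn part [' ']
      let tokens := if rest = [] then tokens.dropLast else tokens
      pvEmitHex tokens loc ++ pvGoB nocase rest (i + 1) (loc + (tokens.length : Int))

def content_conv_alt (content : String) (nocase : Bool) (offset : Int) : List (String × Int) :=
  pvGoB nocase
    (PySem.Chars.splitOn (PySem.List.slice content.toList (some 1) (some (-1))) ['|'])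
    0 offset

-- ===== PRECONDITION & SPEC =====
def Spec_content_conv (content : String) (nocase : Bool) (offset : Int) (out : List (String × Int)) : Prop := out = content_conv_alt content nocase offset
instance (content : String) (nocase : Bool) (offset : Int) (out : List (String × Int)) : Decidable (Spec_content_conv content nocase offset out) := by unfold Spec_content_conv; infer_instance

-- ===== CLAIM (what is proved, stated in full; the proofs are below) =====
def Claim_equal_content_conv : Prop := ∀ (content : String) (nocase : Bool) (offset : Int), Dom_content_conv content nocase offset → Spec_content_conv content nocase offset (content_conv content nocase offset)

-- ===== LEMMAS AND PROOFS =====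

-- proof-only structural form of single-separator split
def pvSplit1 (k : Char) : List Char → List (List Char)
  | [] => [[]]
  | c :: cs =>
    if c = k then [] :: pvSplit1 k cs
    else (c :: (pvSplit1 k cs).headI) :: (pvSplit1 k cs).tail

theorem pvSplit1_cons_sep (k : Char) (l : List Char) :
    pvSplit1 k (k :: l) = [] :: pvSplit1 k l := by simp [pvSplit1]

theorem pvSplit1_cons_ne (k c : Char) (l : List Char) (hc : c ≠ k) :
    pvSplit1 k (c :: l) = (c :: (pvSplit1 k l).headI) :: (pvSplit1 k l).tail := by
  simp [pvSplit1, hc]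

theorem pvSplit1_ne_nil (k : Char) (l : List Char) : pvSplit1 k l ≠ [] := by
  cases l <;> simp [pvSplit1] <;> split <;> simp

theorem pvSplit1_cons_exists (k : Char) (l : List Char) :
    ∃ h t, pvSplit1 k l = h :: t :=
  List.exists_cons_of_ne_nil (pvSplit1_ne_nil k l)

theorem pvSplitOn_go_eq (k : Char) (l : List Char) :
    ∀ fuel cur acc, l.length < fuel →
      PySem.Chars.splitOn.go [k] fuel l cur acc
        = acc.reverse ++ (cur.reverse ++ (pvSplit1 k l).headI) :: (pvSplit1 k l).tail := by
  induction l with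
  | nil =>
    intro fuel cur acc hf
    obtain ⟨f, rfl⟩ := Nat.exists_eq_add_of_lt hf
    rw [PySem.Chars.splitOn.go]
    · simp [pvSplit1]
    · omega
  | cons c rest ih =>
    intro fuel cur acc hf
    obtain ⟨f, rfl⟩ : ∃ f, fuel = f + 1 := ⟨fuel - 1, by omega⟩
    obtain ⟨h, t, hht⟩ := pvSplit1_cons_exists k rest
    rw [PySem.Chars.splitOn.go]
    simp only [List.isPrefixOf, List.drop]
    by_cases hc : c = k
    · subst hc
      simp only [BEq.rfl, Bool.true_and, List.isPrefixOf_nil_left, if_pos,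
        List.length_cons, List.length_nil, List.drop_succ_cons, List.drop_zero]
      rw [ih f [] (cur.reverse :: acc) (by simpa using hf)]
      simp [pvSplit1, hht]
    · have : ([k].isPrefixOf (c :: rest)) = false := by
        simp [List.isPrefixOf]; exact fun h => absurd h.symm hc
      simp only [List.isPrefixOf] at this
      simp only [this]
      rw [if_neg (by simp_all [List.isPrefixOf])]
      rw [ih f (c :: cur) acc (by simpa using hf)]
      simp [pvSplit1, hht, hc]
  
theorem pvSplitOn_eq (k : Char) (l : List Char) :
    PySem.Chars.splitOn l [k] = pvSplit1 k l := by
  obtain ⟨h, t, hht⟩ := pvSplit1_cons_exists k l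
  show PySem.Chars.splitOn.go [k] (l.length + 1) l [] [] = _
  rw [pvSplitOn_go_eq k l (l.length + 1) [] [] (by omega)]
  simp [hht]

theorem pvSplit1_no_sep (k : Char) (l : List Char) (h : ∀ c ∈ l, c ≠ k) :
    pvSplit1 k l = [l] := by
  induction l with
  | nil => rfl
  | cons c cs ih =>
    have hc : c ≠ k := h c (by simp)
    simp [pvSplit1, hc, ih (fun x hx => h x (by simp [hx]))]

theorem pvSplit1_append_sep (k : Char) (a l : List Char) (h : ∀ c ∈ a, c ≠ k) :
    pvSplit1 k (a ++ k :: l) = a :: pvSplit1 k l := by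
  induction a with
  | nil => simp [pvSplit1]
  | cons x a' ih =>
    have hx : x ≠ k := h x (by simp)
    rw [List.cons_append]
    simp [pvSplit1, hx, ih (fun c hc => h c (by simp [hc]))]

-- step lemmas for A's loop body
theorem pvStep_lit_bar (nocase : Bool) (loc : Int) (res : List (String × Int)) (temp : List Char) :
    pvStepA nocase (0, loc, res, temp) '|' = (1, loc, res, temp) := by simp [pvStepA]

theorem pvStep_lit_chr (nocase : Bool) (loc : Int) (res : List (String × Int)) (temp : List Char)
    (c : Char) (hc : c ≠ '|') :
    pvStepA nocase (0, loc, res, temp) c = (0, loc + 1, res ++ [pvLitCmp nocase loc c], temp) := by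
  simp [pvStepA, hc]

theorem pvStep_hex_bar (nocase : Bool) (loc : Int) (res : List (String × Int)) (temp : List Char) :
    pvStepA nocase (1, loc, res, temp) '|' = (0, loc + 1, res ++ [pvHexCmp loc temp], []) := by
  simp [pvStepA]

theorem pvStep_hex_space (nocase : Bool) (loc : Int) (res : List (String × Int)) (temp : List Char) :
    pvStepA nocase (1, loc, res, temp) ' ' = (1, loc + 1, res ++ [pvHexCmp loc temp], []) := by
  simp [pvStepA]

theorem pvStep_hex_chr (nocase : Bool) (loc : Int) (res : List (String × Int)) (temp : List Char)
    (c : Char) (hc : c ≠ '|') (hs : c ≠ ' ') :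
    pvStepA nocase (1, loc, res, temp) c = (1, loc, res, temp ++ [c]) := by
  simp [pvStepA, hc, hs]

theorem pvGoB_odd (nocase : Bool) (part : List Char) (rest : List (List Char)) (i : Nat)
    (loc : Int) (hi : i % 2 = 1) :
    pvGoB nocase (part :: rest) i loc
      = pvEmitHex (if rest = [] then (PySem.Chars.splitOn part [' ']).dropLast
          else PySem.Chars.splitOn part [' ']) loc
        ++ pvGoB nocase rest (i + 1)
          (loc + ((if rest = [] then (PySem.Chars.splitOn part [' ']).dropLast
              else PySem.Chars.splitOn part [' ']).length : Int)) := by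
  simp only [pvGoB]
  rw [if_neg (by omega)]

-- the simulation: A's fold from either state equals B's split-based recursion
theorem pvMain (nocase : Bool) (cs : List Char) :
    (∀ i loc res, i % 2 = 0 →
       (cs.foldl (pvStepA nocase) (0, loc, res, [])).2.2.1
         = res ++ pvGoB nocase (pvSplit1 '|' cs) i loc)
    ∧ (∀ i loc res temp, i % 2 = 1 → (∀ c ∈ temp, c ≠ ' ') →
       (cs.foldl (pvStepA nocase) (1, loc, res, temp)).2.2.1
         = res ++ pvGoB nocase ((temp ++ (pvSplit1 '|' cs).headI) :: (pvSplit1 '|' cs).tail) i loc) := by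
  induction cs with
  | nil =>
    constructor
    · intro i loc res hi
      simp [pvSplit1, pvGoB, hi, pvEmitLit]
    · intro i loc res temp hi htemp
      have h1 : pvSplit1 ' ' temp = [temp] := pvSplit1_no_sep ' ' temp htemp
      simp [pvSplit1, pvGoB, hi, pvSplitOn_eq, h1, pvEmitHex]
  | cons c rest ih =>
    obtain ⟨h, t, hht⟩ := pvSplit1_cons_exists '|' rest
    constructor
    · intro i loc res hi
      by_cases hc : c = '|'
      · subst hc
        rw [List.foldl_cons, pvStep_lit_bar,
          ih.2 (i + 1) loc res [] (by omega) (by simp)]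
        rw [pvSplit1_cons_sep, hht]
        simp [pvGoB, hi, pvEmitLit]
      · rw [List.foldl_cons, pvStep_lit_chr nocase loc res [] c hc,
          ih.1 i (loc + 1) (res ++ [pvLitCmp nocase loc c]) hi]
        rw [pvSplit1_cons_ne '|' c rest hc, hht]
        simp only [List.headI, List.tail]
        simp [pvGoB, hi, pvEmitLit]
        congr 1
        ring
    · intro i loc res temp hi htemp
      by_cases hc : c = '|'
      · -- closing '|': flush temp
        subst hc
        rw [List.foldl_cons, pvStep_hex_bar,
          ih.1 (i + 1) (loc + 1) (res ++ [pvHexCmp loc temp]) (by omega)]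
        rw [pvSplit1_cons_sep, hht]
        simp only [List.headI, List.tail, List.append_nil, List.append_assoc]
        congr 1
        rw [pvGoB_odd nocase temp (h :: t) i loc hi]
        simp only [if_neg (List.cons_ne_nil h t)]
        rw [pvSplitOn_eq, pvSplit1_no_sep ' ' temp htemp]
        simp [pvEmitHex]
      · by_cases hs : c = ' '
        · -- space: flush temp, stay in hex mode
          subst hs
          rw [List.foldl_cons, pvStep_hex_space,
            ih.2 i (loc + 1) (res ++ [pvHexCmp loc temp]) [] hi (by simp)]
          rw [pvSplit1_cons_ne '|' ' ' rest (by decide), hht]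
          simp only [List.headI, List.tail, List.nil_append, List.append_assoc]
          congr 1
          rw [pvGoB_odd nocase (temp ++ ' ' :: h) t i loc hi,
            pvGoB_odd nocase h t i (loc + 1) hi]
          rw [pvSplitOn_eq ' ' (temp ++ ' ' :: h), pvSplitOn_eq ' ' h,
            pvSplit1_append_sep ' ' temp h htemp]
          obtain ⟨sh, st, hst⟩ := pvSplit1_cons_exists ' ' h
          rw [hst]
          by_cases ht0 : t = []
          · subst ht0
            simp [pvEmitHex, pvGoB, List.dropLast_cons₂]
          · simp only [if_neg ht0]
            simp [pvEmitHex]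
            congr 1
            ring
        · -- ordinary hex char: extend temp
          rw [List.foldl_cons, pvStep_hex_chr nocase loc res temp c hc hs,
            ih.2 i loc res (temp ++ [c]) hi
              (by intro x hx; rcases List.mem_append.1 hx with h' | h'
                  · exact htemp x h'
                  · simp at h'; simpa [h'] using hs)]
          rw [pvSplit1_cons_ne '|' c rest hc, hht]
          simp [List.append_assoc]

-- ===== VERDICT (by name: the statement is the Claim_ definition above) =====
theorem content_conv_spec : Claim_equal_content_conv := by
  intro content nocase offset _
  show content_conv content nocase offset = content_conv_alt content nocase offset
  unfold content_conv content_conv_alt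
  rw [pvSplitOn_eq]
  exact (pvMain nocase (PySem.List.slice content.toList (some 1) (some (-1)))).1 0 offset [] rfl
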